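-- pv_equiv track=rewrite | github.com/oOtiti/Gecko-by-Python | LIB/gromhetool.py | nitrofol
-- ===== SOURCE A (Python) =====
-- def nitrofol(ng, group, bond):
--     onitrofol = 0
--     tempoh16 = 0
--     i = 0
--     k = 0
--
--     # only hydroxy group (whether alkohol or carboxylic) is seek of H bonding
--     for i in range(1, ng + 1):
--         if 'OH' in group[i-1]:  # OPEN 'OH'
--             if 'CO(OH)' in group[i-1]:
--                 continue  # EXCLUDE ACID H
--             if group[i-1][:1] != 'c':
--                 continue  # EXCLUDE non aromatic OH
--
--             # search for nitro group on the alpha carbon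
--             tempoh16 = 0     # a phenol is found
--             for k in range(1, ng + 1):
--                 if group[k-1][:1] != 'c':
--                     continue  # EXCLUDE non aromatic groups
--                 if bond[i-1][k-1] != 0:
--                     if 'NO2' in group[k-1]:
--                         tempoh16 += 1
--
--             # increment is maximum 1 per OH (a given OH can only be involded in a single bond)
--             if tempoh16 > 0:
--                 onitrofol += 1
--
--     return onitrofol
-- ===== SOURCE B (Python) =====
-- def nitrofol(ng, group, bond):
--     # index-first: collect NO2-bearing aromatic carbon indices once, then scan OH groups
--     nitro_carbons = [k for k in range(ng) if group[k][:1] == 'c' and 'NO2' in group[k]]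
--     count = 0
--     for i in range(ng):
--         g = group[i]
--         if 'OH' in g and 'CO(OH)' not in g and g[:1] == 'c':
--             if any(bond[i][k] != 0 for k in nitro_carbons):
--                 count += 1
--     return count
-- ===== Notes on version B (the rewrite author's own statement) =====
-- stated objective: alternative
-- what changed: B first builds the list of NO2-bearing aromatic-carbon indices in one pass, then for each aromatic OH group checks only those indices (with a short-circuiting any), instead of A's full inner scan over all ng groups per OH group with a running counter.
import Mathlib
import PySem

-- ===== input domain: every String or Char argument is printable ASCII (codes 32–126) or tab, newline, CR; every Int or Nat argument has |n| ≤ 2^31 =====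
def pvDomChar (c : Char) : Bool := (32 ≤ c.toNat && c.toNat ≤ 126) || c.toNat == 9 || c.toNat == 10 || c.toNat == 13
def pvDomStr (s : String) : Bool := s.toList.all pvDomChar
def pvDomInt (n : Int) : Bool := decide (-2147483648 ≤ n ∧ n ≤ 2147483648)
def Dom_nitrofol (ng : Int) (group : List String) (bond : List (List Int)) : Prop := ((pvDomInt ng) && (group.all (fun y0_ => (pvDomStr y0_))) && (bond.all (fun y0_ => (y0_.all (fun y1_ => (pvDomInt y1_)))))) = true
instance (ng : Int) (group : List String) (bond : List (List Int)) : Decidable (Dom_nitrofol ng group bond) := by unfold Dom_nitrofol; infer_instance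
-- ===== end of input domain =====

-- B builds the list of NO2-bearing aromatic-carbon indices once and then scans the OH groups
-- against only those indices (alternative decomposition; same asymptotic cost in the worst case).

-- ===== PORT A =====
def nitrofol (ng : Int) (group : List String) (bond : List (List Int)) : Int :=
  (PySem.List.pyRange 1 (ng + 1) 1).foldl (fun onitrofol i =>
    let g := PySem.List.pyGetD group (i - 1) ""
    if PySem.Str.isIn "OH" g then
      if PySem.Str.isIn "CO(OH)" g then onitrofol           -- continue: EXCLUDE ACID H
      else if PySem.Str.slice g none (some 1) ≠ "c" then onitrofol  -- continue: EXCLUDE non aromatic OH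
      else
        let tempoh16 : Int := (PySem.List.pyRange 1 (ng + 1) 1).foldl (fun t k =>
          let gk := PySem.List.pyGetD group (k - 1) ""
          if PySem.Str.slice gk none (some 1) ≠ "c" then t  -- continue: EXCLUDE non aromatic groups
          else if PySem.List.pyGetD (PySem.List.pyGetD bond (i - 1) []) (k - 1) 0 ≠ 0 then
            if PySem.Str.isIn "NO2" gk then t + 1 else t
          else t) 0
        if tempoh16 > 0 then onitrofol + 1 else onitrofol
    else onitrofol) 0

-- ===== PORT B =====
def nitrofol_alt (ng : Int) (group : List String) (bond : List (List Int)) : Int :=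
  let nitro_carbons : List Int := (PySem.List.pyRange 0 ng 1).filter (fun k =>
    let g := PySem.List.pyGetD group k ""
    PySem.Str.slice g none (some 1) == "c" && PySem.Str.isIn "NO2" g)
  (PySem.List.pyRange 0 ng 1).foldl (fun count i =>
    let g := PySem.List.pyGetD group i ""
    if PySem.Str.isIn "OH" g && !PySem.Str.isIn "CO(OH)" g
        && (PySem.Str.slice g none (some 1) == "c") then
      if nitro_carbons.any (fun k =>
          PySem.List.pyGetD (PySem.List.pyGetD bond i []) k 0 ≠ 0) then count + 1 else count
    else count) 0

-- ===== PRECONDITION & SPEC =====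
-- Pre_ holds exactly when every index A dereferences is in range: group has at least ng
-- entries, and for each aromatic OH group i the bond row i exists and covers every aromatic
-- column k; outside Pre_ the Python A raises IndexError.
def Pre_nitrofol (ng : Int) (group : List String) (bond : List (List Int)) : Prop :=
  ng ≤ (group.length : Int) ∧
  ∀ i < ng.toNat,
    (PySem.Str.isIn "OH" (PySem.List.pyGetD group (i : Int) "") = true ∧
     PySem.Str.isIn "CO(OH)" (PySem.List.pyGetD group (i : Int) "") = false ∧
     PySem.Str.slice (PySem.List.pyGetD group (i : Int) "") none (some 1) = "c") →
    (i < bond.length ∧ ∀ k < ng.toNat,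
       PySem.Str.slice (PySem.List.pyGetD group (k : Int) "") none (some 1) = "c" →
       k < (PySem.List.pyGetD bond (i : Int) []).length)
instance (ng : Int) (group : List String) (bond : List (List Int)) : Decidable (Pre_nitrofol ng group bond) := by unfold Pre_nitrofol; infer_instance

def pvWitness_nitrofol : Int × List String × List (List Int) :=
  (2, ["cOH", "cNO2"], [[0, 1], [1, 0]])

def Spec_nitrofol (ng : Int) (group : List String) (bond : List (List Int)) (out : Int) : Prop := out = nitrofol_alt ng group bond
instance (ng : Int) (group : List String) (bond : List (List Int)) (out : Int) : Decidable (Spec_nitrofol ng group bond out) := by unfold Spec_nitrofol; infer_instance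

-- ===== CLAIM (what is proved, stated in full; the proofs are below) =====
def Claim_equal_nitrofol : Prop := ∀ (ng : Int) (group : List String) (bond : List (List Int)), Dom_nitrofol ng group bond → Pre_nitrofol ng group bond → Spec_nitrofol ng group bond (nitrofol ng group bond)

-- ===== LEMMAS AND PROOFS =====

-- fold with pointwise-equal step functions
lemma foldl_ext {a b : Type} (l : List b) (f g : a -> b -> a) (i : a)
    (h : ∀ x y, f x y = g x y) : l.foldl f i = l.foldl g i := by
  have : f = g := funext fun x => funext (h x)
  rw [this]

-- range(1, n+1) is range(0, n) shifted by one
lemma pyRange_one_shift (n : Int) :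
    PySem.List.pyRange 1 (n + 1) 1 = (PySem.List.pyRange 0 n 1).map (· + 1) := by
  rw [PySem.List.pyRange_one, PySem.List.pyRange_one, List.map_map]
  have h : n + 1 - 1 = n - 0 := by ring
  rw [h]
  apply List.map_congr_left
  intro k _
  simp [add_comm]

-- a counting loop started at t is t plus a countP
lemma foldl_count_eq (l : List Int) (c : Int → Bool) (t : Int) :
    l.foldl (fun t k => if c k then t + 1 else t) t = t + (l.countP c : Int) := by
  induction l generalizing t with
  | nil => simp
  | cons hd tl ih =>
    by_cases h : c hd <;> simp [List.foldl_cons, h, ih] <;> push_cast <;> ring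

-- A's inner counter is positive iff some filtered index has a nonzero bond entry
lemma inner_count (l : List Int) (s : Int → String) (n : Int → Bool) (w : Int → Int) :
    (l.foldl (fun (t : Int) k =>
        if s k ≠ "c" then t
        else if w k ≠ 0 then (if n k then t + 1 else t) else t) 0 > 0)
    ↔ ((l.filter (fun k => (s k == "c") && n k)).any (fun k => decide (w k ≠ 0)) = true) := by
  rw [foldl_ext l _ (fun t k => if ((s k == "c") && n k && decide (w k ≠ 0)) then t + 1 else t) 0
    (by intro t k
        by_cases h1 : s k = "c" <;> by_cases h2 : w k = 0 <;> by_cases h3 : n k = true <;>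
          simp [h1, h2, h3])]
  rw [foldl_count_eq l (fun k => (s k == "c") && n k && decide (w k ≠ 0)) 0]
  rw [zero_add, gt_iff_lt, Int.natCast_pos, List.countP_pos_iff, List.any_eq_true]
  simp only [List.mem_filter, Bool.and_eq_true, decide_eq_true_eq, beq_iff_eq]
  tauto

-- one outer step of A equals one outer step of B, given the inner/any correspondence
lemma step_eq (x y : Bool) (s : String) (acc T : Int) (anyb : Bool)
    (h : T > 0 ↔ anyb = true) :
    (if x then
      if y then acc
      else if s ≠ "c" then acc
      else if T > 0 then acc + 1 else acc
    else acc)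
    = (if x && !y && (s == "c") then (if anyb then acc + 1 else acc) else acc) := by
  cases x <;> cases y <;> by_cases hs : s = "c" <;> simp [hs, h]

-- the two ports agree (no precondition needed: out-of-range lookups default to "" / 0 identically)
lemma ports_agree (ng : Int) (group : List String) (bond : List (List Int)) :
    nitrofol ng group bond = nitrofol_alt ng group bond := by
  unfold nitrofol nitrofol_alt
  rw [pyRange_one_shift, List.foldl_map]
  apply foldl_ext
  intro acc i
  simp only [Int.add_sub_cancel]
  refine step_eq _ _ _ _ _ _ ?_
  rw [List.foldl_map]
  simp only [Int.add_sub_cancel]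
  exact inner_count (PySem.List.pyRange 0 ng 1)
    (fun k => PySem.Str.slice (PySem.List.pyGetD group k "") none (some 1))
    (fun k => PySem.Str.isIn "NO2" (PySem.List.pyGetD group k ""))
    (fun k => PySem.List.pyGetD (PySem.List.pyGetD bond i []) k 0)

-- ===== VERDICT (by name: the statement is the Claim_ definition above) =====
theorem nitrofol_spec : Claim_equal_nitrofol := by
  intro ng group bond _ _
  exact ports_agree ng group bond
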